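-- pv_equiv track=rewrite | github.com/TheAlgorithms/Python- | graphics/butterfly_pattern.py | butterfly_pattern
-- ===== SOURCE A (Python) =====
-- def butterfly_pattern(n: int) -> str:
--     """
--     Creates a butterfly pattern of size n and returns it as a string.
--     """
--     result = []
--
--     # Upper part
--     for i in range(1, n + 1):
--         left_stars = "*" * i
--         spaces = " " * (2 * (n - i + 2))
--         right_stars = "*" * i
--         result.append(left_stars + spaces + right_stars)
--
--     # Lower part
--     for i in range(n - 1, 0, -1):
--         left_stars = "*" * i
--         spaces = " " * (2 * (n - i + 2))
--         right_stars = "*" * i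
--         result.append(left_stars + spaces + right_stars)
--
--     return "\n".join(result)
-- ===== SOURCE B (Python) =====
-- def butterfly_pattern(n: int) -> str:
--     """
--     Creates a butterfly pattern of size n and returns it as a string.
--
--     Maintains one mutable row buffer of fixed width, initially all
--     spaces; each row differs from the previous one in exactly two cells
--     (the star boundaries advance in the upper half and retreat in the lower
--     half), so every row is produced by two writes plus a snapshot.
--     """
--     w = 2 * n + 4
--     row = [" "] * w
--     lines = []
--     for i in range(1, n + 1):
--         row[i - 1] = "*"
--         row[w - i] = "*"
--         lines.append("".join(row))
--     for i in range(n - 1, 0, -1):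
--         row[i] = " "
--         row[w - i - 1] = " "
--         lines.append("".join(row))
--     return "\n".join(lines)
-- ===== Notes on version B (the rewrite author's own statement) =====
-- stated objective: alternative
-- what changed: B replaces A's per-row recomputation by string repetition with a single mutable row buffer of fixed width, initially all spaces, in which each successive row is obtained by exactly two cell writes (the star boundaries advance in the upper half and retreat in the lower half) followed by a snapshot.
import Mathlib
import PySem

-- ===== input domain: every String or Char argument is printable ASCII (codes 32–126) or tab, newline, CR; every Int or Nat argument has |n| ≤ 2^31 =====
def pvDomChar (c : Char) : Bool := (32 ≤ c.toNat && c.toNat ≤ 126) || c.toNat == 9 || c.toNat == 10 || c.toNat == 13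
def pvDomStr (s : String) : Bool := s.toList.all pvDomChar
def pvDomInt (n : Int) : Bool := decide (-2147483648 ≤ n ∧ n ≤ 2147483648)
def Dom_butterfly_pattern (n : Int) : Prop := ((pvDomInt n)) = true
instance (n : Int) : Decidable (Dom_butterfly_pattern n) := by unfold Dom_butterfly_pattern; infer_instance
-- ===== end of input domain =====

-- B keeps one mutable fixed-width row buffer and derives each row from the previous one by two
-- cell writes, instead of A's per-row star/space block concatenation (objective: alternative).

-- ===== PORT A =====
-- '"*" * i' is List.replicate i.toNat '*' (exact: a non-positive count gives ""), '+' on str is list append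
def butterfly_pattern (n : Int) : String :=
  let result : List String := []
  -- Upper part
  let result := (PySem.List.pyRange 1 (n + 1) 1).foldl (fun result i =>
    let left_stars := List.replicate i.toNat '*'
    let spaces := List.replicate (2 * (n - i + 2)).toNat ' '
    let right_stars := List.replicate i.toNat '*'
    result ++ [String.mk (left_stars ++ spaces ++ right_stars)]) result
  -- Lower part
  let result := (PySem.List.pyRange (n - 1) 0 (-1)).foldl (fun result i =>
    let left_stars := List.replicate i.toNat '*'
    let spaces := List.replicate (2 * (n - i + 2)).toNat ' '
    let right_stars := List.replicate i.toNat '*'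
    result ++ [String.mk (left_stars ++ spaces ++ right_stars)]) result
  PySem.Str.join "\n" result

-- ===== PORT B =====
-- the mutable list 'row' threads through both loops as part of the fold state;
-- 'row[j] = c' is List.set j.toNat c (exact here: every written index is in range, see the proofs)
def butterfly_pattern_alt (n : Int) : String :=
  let w := 2 * n + 4
  let row : List Char := List.replicate w.toNat ' '
  let st := (PySem.List.pyRange 1 (n + 1) 1).foldl (fun (p : List Char × List String) i =>
    let row := (p.1.set (i - 1).toNat '*').set (w - i).toNat '*'
    (row, p.2 ++ [String.mk row])) (row, [])
  let st := (PySem.List.pyRange (n - 1) 0 (-1)).foldl (fun (p : List Char × List String) i =>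
    let row := (p.1.set i.toNat ' ').set (w - i - 1).toNat ' '
    (row, p.2 ++ [String.mk row])) st
  PySem.Str.join "\n" st.2

-- ===== PRECONDITION & SPEC =====
def Spec_butterfly_pattern (n : Int) (out : String) : Prop := out = butterfly_pattern_alt n
instance (n : Int) (out : String) : Decidable (Spec_butterfly_pattern n out) := by unfold Spec_butterfly_pattern; infer_instance

-- ===== CLAIM (what is proved, stated in full; the proofs are below) =====
def Claim_equal_butterfly_pattern : Prop := ∀ (n : Int), Dom_butterfly_pattern n → Spec_butterfly_pattern n (butterfly_pattern n)

-- ===== LEMMAS AND PROOFS =====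

-- A's row with star count i (exactly the string A appends for loop index i)
def rowOf (n i : Int) : List Char :=
  List.replicate i.toNat '*' ++ List.replicate (2 * (n - i + 2)).toNat ' '
    ++ List.replicate i.toNat '*'

theorem rowOf_length (n i : Int) (h0 : 0 ≤ i) (hi : i ≤ n) :
    (rowOf n i).length = (2 * n + 4).toNat := by
  simp [rowOf]; omega

theorem rowOf_getElem (n i : Int) (h0 : 0 ≤ i) (hi : i ≤ n) (k : Nat)
    (hk : k < (rowOf n i).length) :
    (rowOf n i)[k] = if (k : Int) < i ∨ 2 * n + 4 - i ≤ (k : Int) then '*' else ' ' := by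
  have hlen := rowOf_length n i h0 hi
  simp only [rowOf, List.getElem_append, List.length_replicate, List.length_append,
    List.getElem_replicate] at hk ⊢
  split_ifs <;> first | rfl | omega

theorem rowOf_zero (n : Int) (hn : 0 ≤ n) : rowOf n 0 = List.replicate (2 * n + 4).toNat ' ' := by
  simp only [rowOf, Int.toNat_zero, List.replicate_zero, List.nil_append, List.append_nil]
  congr 1; omega

-- one upper-half step: the two writes advance the star boundaries from count i-1 to count i
theorem up_step (n i : Int) (h1 : 1 ≤ i) (h2 : i ≤ n) :
    ((rowOf n (i - 1)).set (i - 1).toNat '*').set (2 * n + 4 - i).toNat '*' = rowOf n i := by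
  apply List.ext_getElem
  · simp [List.length_set, rowOf_length n (i - 1) (by omega) (by omega),
      rowOf_length n i (by omega) h2]
  intro k hk hk'
  have hlen := rowOf_length n (i - 1) (by omega : (0:Int) ≤ i - 1) (by omega)
  have hlen' := rowOf_length n i (by omega) h2
  simp only [List.getElem_set, List.length_set] at hk ⊢
  rw [rowOf_getElem n i (by omega) h2 k (by omega),
    rowOf_getElem n (i - 1) (by omega) (by omega) k (by omega)]
  split_ifs <;> first | rfl | omega

-- one lower-half step: the two writes retreat the star boundaries from count i+1 to count i
theorem down_step (n i : Int) (h1 : 1 ≤ i) (h2 : i ≤ n - 1) :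
    ((rowOf n (i + 1)).set i.toNat ' ').set (2 * n + 4 - i - 1).toNat ' ' = rowOf n i := by
  apply List.ext_getElem
  · simp [List.length_set, rowOf_length n (i + 1) (by omega) (by omega),
      rowOf_length n i (by omega) (by omega)]
  intro k hk hk'
  have hlen := rowOf_length n (i + 1) (by omega : (0:Int) ≤ i + 1) (by omega)
  have hlen' := rowOf_length n i (by omega) (by omega)
  simp only [List.getElem_set, List.length_set] at hk ⊢
  rw [rowOf_getElem n i (by omega) (by omega) k (by omega),
    rowOf_getElem n (i + 1) (by omega) (by omega) k (by omega)]
  split_ifs <;> first | rfl | omega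

-- upper-loop invariant: starting from the row with star count j, the remaining upper loop
-- appends exactly A's rows j+1 .. n and leaves the row with star count n
theorem upper_loop (n : Int) (j : Int) (h0 : 0 ≤ j) (hn : j ≤ n) (acc : List String) :
    (PySem.List.pyRange (j + 1) (n + 1) 1).foldl (fun (p : List Char × List String) i =>
        ((p.1.set (i - 1).toNat '*').set (2 * n + 4 - i).toNat '*',
          p.2 ++ [String.mk ((p.1.set (i - 1).toNat '*').set (2 * n + 4 - i).toNat '*')]))
      (rowOf n j, acc)
    = (rowOf n n, acc ++ (PySem.List.pyRange (j + 1) (n + 1) 1).map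
        (fun i => String.mk (rowOf n i))) := by
  obtain ⟨m, hm⟩ : ∃ m : Nat, n - j = (m : Int) := ⟨(n - j).toNat, by omega⟩
  induction m generalizing j acc with
  | zero =>
    rw [PySem.List.pyRange_one_eq_nil (by omega)]
    have : j = n := by omega
    subst this
    simp
  | succ k ih =>
    rw [PySem.List.pyRange_one_cons (by omega)]
    simp only [List.foldl_cons, List.map_cons]
    have hstep := up_step n (j + 1) (by omega) (by omega)
    rw [show (j : Int) + 1 - 1 = j from by ring] at hstep
    have e1 : (j + 1 - 1).toNat = j.toNat := by omega
    rw [e1, hstep]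
    rw [ih (j + 1) (by omega) (by omega) (acc ++ [String.mk (rowOf n (j + 1))]) (by omega)]
    simp

-- lower-loop invariant: starting from the row with star count j, the countdown loop
-- appends exactly A's rows j-1 .. 1 and ends with star count min j 1
theorem lower_loop (n : Int) (j : Int) (h1 : 1 ≤ j) (hn : j ≤ n) (acc : List String) :
    (PySem.List.pyRange (j - 1) 0 (-1)).foldl (fun (p : List Char × List String) i =>
        ((p.1.set i.toNat ' ').set (2 * n + 4 - i - 1).toNat ' ',
          p.2 ++ [String.mk ((p.1.set i.toNat ' ').set (2 * n + 4 - i - 1).toNat ' ')]))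
      (rowOf n j, acc)
    = (rowOf n 1, acc ++ (PySem.List.pyRange (j - 1) 0 (-1)).map
        (fun i => String.mk (rowOf n i))) := by
  obtain ⟨m, hm⟩ : ∃ m : Nat, j - 1 = (m : Int) := ⟨(j - 1).toNat, by omega⟩
  induction m generalizing j acc with
  | zero =>
    rw [PySem.List.pyRange_neg_one_eq_nil (by omega)]
    have : j = 1 := by omega
    subst this
    simp
  | succ k ih =>
    rw [PySem.List.pyRange_neg_one_cons (by omega)]
    simp only [List.foldl_cons, List.map_cons]
    have e1 : j - 1 + 1 = j := by omega
    have hstep := down_step n (j - 1) (by omega) (by omega)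
    rw [e1] at hstep
    rw [hstep]
    rw [ih (j - 1) (by omega) (by omega) (acc ++ [String.mk (rowOf n (j - 1))]) (by omega)]
    simp

-- ===== VERDICT (by name: the statement is the Claim_ definition above) =====
theorem butterfly_pattern_spec : Claim_equal_butterfly_pattern := by
  intro n _
  show _ = _
  unfold butterfly_pattern butterfly_pattern_alt
  simp only [PySem.List.foldl_append_singleton_eq_map, List.nil_append]
  by_cases hn : 0 < n
  · have hu := upper_loop n 0 (by omega) (by omega) []
    simp only [zero_add, List.nil_append] at hu
    rw [← rowOf_zero n (by omega), hu]
    rw [lower_loop n n (by omega) (by omega)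
      ((PySem.List.pyRange 1 (n + 1) 1).map (fun i => String.mk (rowOf n i)))]
    simp [rowOf]
  · rw [PySem.List.pyRange_one_eq_nil (by omega), PySem.List.pyRange_neg_one_eq_nil (by omega)]
    rfl
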